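-- pv_equiv track=rewrite | github.com/Unthinkingbit/charity | tomecount.py | getImageCount
-- ===== SOURCE A (Python) =====
-- def getImageCount(linkText):
-- 	'Get the image count of the page linked to in the line.'
-- 	if linkText == '':
-- 		return 0
-- 	imageCount = 0
-- 	lines = linkText.lower().split('[[')
-- 	for line in lines:
-- 		if line.startswith('file:') or line.startswith('image:'):
-- 			if (']]') in line:
-- 				line = line[: line.find(']]')].strip()
-- 			if ('|') in line:
-- 				line = line[: line.find('|')].strip()
-- 			if line.endswith('.gif') or line.endswith('.jpg') or line.endswith('.png'):
-- 				imageCount += 1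
-- 	return imageCount
-- ===== SOURCE B (Python) =====
-- def getImageCount(linkText):
--     'Get the image count of the page linked to in the line.'
--     s = linkText.lower()
--     n = len(s)
--     count = 0
--     i = 0
--     at_link = True  # True at the start of the text and right after each '[[' delimiter
--     while i < n:
--         if at_link and (s.startswith('file:', i) or s.startswith('image:', i)):
--             j = i
--             while j < n and not (s.startswith(']]', j) or s[j] == '|' or s.startswith('[[', j)):
--                 j += 1
--             name = s[i:j].strip()
--             if name.endswith(('.gif', '.jpg', '.png')):
--                 count += 1
--             i = j
--             at_link = False
--         elif s.startswith('[[', i):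
--             i += 2
--             at_link = True
--         else:
--             i += 1
--             at_link = False
--     return count
-- ===== Notes on version B (the rewrite author's own statement) =====
-- stated objective: alternative
-- what changed: Replaces A's split-into-segments-then-per-segment substring-search/slice/strip passes with a single left-to-right cursor state-machine scan over the lowercased text that recognises link starts and name terminators in place, stripping and suffix-testing each extracted name as it is found.
-- intended difference: On texts with a '[[file:'/'[[image:' link terminated by neither ']]' nor '|' whose name ends in whitespace before a .gif/.jpg/.png extension, A skips the link (it strips only after cutting at a found terminator) while B strips every extracted name and counts it; uniform stripping is the intended behaviour. — e.g. on getImageCount("[[file:a.png "): A returns 0, B returns 1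
import Mathlib
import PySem

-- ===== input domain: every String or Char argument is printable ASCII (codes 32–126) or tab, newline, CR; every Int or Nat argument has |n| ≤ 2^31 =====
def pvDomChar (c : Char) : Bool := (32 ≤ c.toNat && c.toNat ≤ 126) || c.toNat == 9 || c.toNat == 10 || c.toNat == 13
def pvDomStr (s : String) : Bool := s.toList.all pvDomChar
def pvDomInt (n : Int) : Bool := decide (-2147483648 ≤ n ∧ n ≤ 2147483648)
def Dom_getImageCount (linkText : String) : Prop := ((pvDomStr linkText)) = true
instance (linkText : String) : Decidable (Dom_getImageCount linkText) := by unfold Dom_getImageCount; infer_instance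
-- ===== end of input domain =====

-- B replaces A's split-into-segments-then-per-segment substring-search/slice/strip passes by a
-- single left-to-right cursor scan that recognises link starts and name terminators in place and
-- strips every extracted name (objective: alternative); on unterminated links whose name has
-- trailing whitespace this differs from A, as stated in D_ below.

-- ===== PORT A =====
-- literal transliteration of Source A: split the lowercased text on '[[', and for each piece that
-- starts with 'file:'/'image:' cut at ']]' then at '|' (stripping after each cut) and test the suffix.
def getImageCount (linkText : String) : Int :=
  if linkText = "" then 0
  else
    (PySem.Chars.splitOn (PySem.Chars.lower linkText.toList) ['[', '[']).foldl
      (fun imageCount line =>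
        if PySem.Chars.startswith line ['f','i','l','e',':']
            || PySem.Chars.startswith line ['i','m','a','g','e',':'] then
          let line1 := if PySem.Chars.isIn [']',']'] line then
              PySem.Chars.strip (PySem.List.slice line none (some (PySem.Chars.find line [']',']'])))
            else line
          let line2 := if PySem.Chars.isIn ['|'] line1 then
              PySem.Chars.strip (PySem.List.slice line1 none (some (PySem.Chars.find line1 ['|'])))
            else line1
          if PySem.Chars.endswith line2 ['.','g','i','f']
              || PySem.Chars.endswith line2 ['.','j','p','g']
              || PySem.Chars.endswith line2 ['.','p','n','g'] then
            imageCount + 1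
          else imageCount
        else imageCount) 0

-- ===== PORT B =====
-- Source B's inner while loop: scan forward until ']]', '|' or '[[' (or the end); return the scanned name.
def altScanName : List Char → List Char
  | [] => []
  | c :: cs =>
    if c = ']' ∧ cs.head? = some ']' then []
    else if c = '|' then []
    else if c = '[' ∧ cs.head? = some '[' then []
    else c :: altScanName cs

-- termination fact for altLoop: when the text starts with 'file:'/'image:' the scanned name is nonempty
theorem altScanName_pos (l : List Char)
    (h : (PySem.Chars.startswith l ['f','i','l','e',':']
       || PySem.Chars.startswith l ['i','m','a','g','e',':']) = true) :
    1 ≤ (altScanName l).length := by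
  rcases Bool.or_eq_true_iff.mp h with h | h <;>
  · simp only [PySem.Chars.startswith, List.isPrefixOf_iff_prefix] at h
    obtain ⟨t, ht⟩ := h
    subst ht
    simp [altScanName]

-- Source B's outer while loop: atStart is Source B's at_link, the three branches in Source B's order.
def altLoop (atStart : Bool) (l : List Char) : Int :=
  match l with
  | [] => 0
  | c :: cs =>
    if h : atStart && (PySem.Chars.startswith (c :: cs) ['f','i','l','e',':']
        || PySem.Chars.startswith (c :: cs) ['i','m','a','g','e',':']) then
      let name := PySem.Chars.strip (altScanName (c :: cs))
      (if PySem.Chars.endswith name ['.','g','i','f']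
          || PySem.Chars.endswith name ['.','j','p','g']
          || PySem.Chars.endswith name ['.','p','n','g'] then (1 : Int) else 0)
        + altLoop false ((c :: cs).drop (altScanName (c :: cs)).length)
    else if c = '[' ∧ cs.head? = some '[' then
      altLoop true ((c :: cs).drop 2)
    else
      altLoop false cs
termination_by l.length
decreasing_by
  · have := altScanName_pos (c :: cs) (Bool.and_eq_true_iff.mp h).2
    simp [List.length_drop]
    omega
  · simp [List.length_drop]
  · simp

def getImageCount_alt (linkText : String) : Int :=
  altLoop true (PySem.Chars.lower linkText.toList)

-- ===== PRECONDITION & SPEC =====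
-- On texts with a '[[file:'/'[[image:' link terminated by neither ']]' nor '|' whose name ends in
-- whitespace before a .gif/.jpg/.png extension, A skips the link (it strips only after cutting at a
-- found terminator) while B strips every extracted name and counts it; uniform stripping is intended.
def D_getImageCount (linkText : String) : Prop :=
  ∃ seg ∈ PySem.Chars.splitOn (PySem.Chars.lower linkText.toList) "[[".toList,
    ("file:".toList <+: seg ∨ "image:".toList <+: seg) ∧
    ¬ "]]".toList <:+: seg ∧ '|' ∉ seg ∧
    (seg.getLast?.any PySem.Chars.isspace) = true ∧
    (".gif".toList <:+ PySem.Chars.strip seg ∨ ".jpg".toList <:+ PySem.Chars.strip seg ∨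
      ".png".toList <:+ PySem.Chars.strip seg)
instance (linkText : String) : Decidable (D_getImageCount linkText) := by unfold D_getImageCount; infer_instance

def Spec_getImageCount (linkText : String) (out : Int) : Prop := ¬ D_getImageCount linkText → out = getImageCount_alt linkText
instance (linkText : String) (out : Int) : Decidable (Spec_getImageCount linkText out) := by unfold Spec_getImageCount; infer_instance

def pvDiffWitness_getImageCount : String := "[[file:a.png "
def pvDiffWitnessOut_getImageCount : Int × Int := (0, 1)

-- ===== CLAIM (what is proved, stated in full; the proofs are below) =====
def Claim_unchanged_getImageCount : Prop := ∀ (linkText : String), Dom_getImageCount linkText → Spec_getImageCount linkText (getImageCount linkText)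
def Claim_changed_getImageCount : Prop := Dom_getImageCount (pvDiffWitness_getImageCount) ∧ D_getImageCount (pvDiffWitness_getImageCount) ∧ getImageCount (pvDiffWitness_getImageCount) = pvDiffWitnessOut_getImageCount.1 ∧ getImageCount_alt (pvDiffWitness_getImageCount) = pvDiffWitnessOut_getImageCount.2 ∧ pvDiffWitnessOut_getImageCount.1 ≠ pvDiffWitnessOut_getImageCount.2
def Claim_exact_getImageCount : Prop := ∀ (linkText : String), Dom_getImageCount linkText → D_getImageCount linkText → getImageCount linkText ≠ getImageCount_alt linkText

-- ===== LEMMAS AND PROOFS =====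

-- proof-side model of Python's split('[['), structurally recursive
def split2 : List Char → List (List Char)
  | [] => [[]]
  | [c] => [[c]]
  | c :: d :: cs =>
    if c = '[' ∧ d = '[' then [] :: split2 cs
    else (split2 (d :: cs)).modifyHead (c :: ·)

-- does the segment contain a terminator (']]' or '|') anywhere?
def hasT : List Char → Bool
  | [] => false
  | c :: cs => (decide (c = ']' ∧ cs.head? = some ']') || decide (c = '|')) || hasT cs

-- A-side abbreviations used by the proofs
def isPic (s : List Char) : Bool :=
  PySem.Chars.startswith s ['f','i','l','e',':']
    || PySem.Chars.startswith s ['i','m','a','g','e',':']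

def extM (s : List Char) : Bool :=
  PySem.Chars.endswith s ['.','g','i','f']
    || PySem.Chars.endswith s ['.','j','p','g']
    || PySem.Chars.endswith s ['.','p','n','g']

-- unfolding lemma for split2 in the shape the proofs below use
theorem split2_cons (c : Char) (cs : List Char) :
    split2 (c :: cs) = if c = '[' ∧ cs.head? = some '[' then [] :: split2 cs.tail
      else (split2 cs).modifyHead (c :: ·) := by
  rcases cs with _ | ⟨d, cs'⟩
  · simp [split2]
  · rw [show split2 (c :: d :: cs') = if c = '[' ∧ d = '[' then [] :: split2 cs'
        else (split2 (d :: cs')).modifyHead (c :: ·) from rfl]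
    by_cases h : c = '[' ∧ d = '['
    · rw [if_pos h, if_pos ⟨h.1, by simp [h.2]⟩]
      simp
    · rw [if_neg h, if_neg (by simpa using h)]

-- A's per-line body, extracted (the fold step is acc + aLine line)
def aLine (line : List Char) : Int :=
  if PySem.Chars.startswith line ['f','i','l','e',':']
      || PySem.Chars.startswith line ['i','m','a','g','e',':'] then
    let line1 := if PySem.Chars.isIn [']',']'] line then
        PySem.Chars.strip (PySem.List.slice line none (some (PySem.Chars.find line [']',']'])))
      else line
    let line2 := if PySem.Chars.isIn ['|'] line1 then
        PySem.Chars.strip (PySem.List.slice line1 none (some (PySem.Chars.find line1 ['|'])))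
      else line1
    if PySem.Chars.endswith line2 ['.','g','i','f']
        || PySem.Chars.endswith line2 ['.','j','p','g']
        || PySem.Chars.endswith line2 ['.','p','n','g'] then 1
    else 0
  else 0

-- cut a list at the first occurrence of pattern p (A's line[: line.find(p)])
def cutPre (p : List Char) : List Char → List Char
  | [] => []
  | c :: cs => if p.isPrefixOf (c :: cs) then [] else c :: cutPre p cs

-- cut at the first ']]'-or-'|' position (the combined effect of A's two cuts)
def cutMin : List Char → List Char
  | [] => []
  | c :: cs => if (c = ']' ∧ cs.head? = some ']') ∨ c = '|' then [] else c :: cutMin cs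

-- B's per-segment value
def bLine (seg : List Char) : Int :=
  if isPic seg then (if extM (PySem.Chars.strip (cutMin seg)) then 1 else 0) else 0

def segSum (l : List Char) : Int := ((split2 l).map aLine).sum
def tailSum (l : List Char) : Int := (((split2 l).tail).map aLine).sum
def segSumB (l : List Char) : Int := ((split2 l).map bLine).sum
def tailSumB (l : List Char) : Int := (((split2 l).tail).map bLine).sum

theorem split2_ne_nil (l : List Char) : split2 l ≠ [] := by
  fun_induction split2 l with
  | case1 => simp
  | case2 c => simp
  | case3 c d cs h ih => simp
  | case4 c d cs h ih =>
    rcases h2 : split2 (d :: cs) with _ | ⟨a, t⟩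
    · exact absurd h2 ih
    · simp [h2]

theorem headI_split2_prefix (l : List Char) : (split2 l).headI <+: l := by
  fun_induction split2 l with
  | case1 => simp
  | case2 c => simp
  | case3 c d cs h ih => simp
  | case4 c d cs h ih =>
    rcases h2 : split2 (d :: cs) with _ | ⟨a, t⟩
    · exact absurd h2 (split2_ne_nil (d :: cs))
    · rw [h2] at ih
      simp only [h2, List.modifyHead, List.headI] at *
      exact List.cons_prefix_cons.mpr ⟨rfl, ih⟩

theorem prefix_headI_split2 (p l : List Char) (hp : ∀ c ∈ p, c ≠ '[') (h : p <+: l) :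
    p <+: (split2 l).headI := by
  induction p generalizing l with
  | nil => simp
  | cons x p' ih =>
    rcases h with ⟨t, ht⟩
    subst ht
    have hx : x ≠ '[' := hp x (by simp)
    rw [List.cons_append, split2_cons, if_neg (by simp [hx])]
    rcases h2 : split2 (p' ++ t) with _ | ⟨a, r⟩
    · exact absurd h2 (split2_ne_nil _)
    · have := ih (p' ++ t) (fun c hc => hp c (by simp [hc])) ⟨t, rfl⟩
      rw [h2] at this
      simp only [List.modifyHead, List.headI] at this ⊢
      exact List.cons_prefix_cons.mpr ⟨rfl, this⟩

theorem head?_headI_split2 (l : List Char) (x : Char) (hx : x ≠ '[') :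
    ((split2 l).headI.head? = some x) ↔ l.head? = some x := by
  rcases l with _ | ⟨c, cs⟩
  · simp [split2]
  · rw [split2_cons]
    by_cases hc : c = '[' ∧ cs.head? = some '['
    · rw [if_pos hc]
      simp only [List.headI, List.head?_nil, List.head?_cons, hc.1]
      simp [eq_comm (a := some '[') (b := some x)]
      exact fun h => hx h
    · rw [if_neg hc]
      rcases h2 : split2 cs with _ | ⟨a, r⟩
      · exact absurd h2 (split2_ne_nil _)
      · simp

theorem tail_split2_drop (k : Nat) (l : List Char) (hk : k ≤ (split2 l).headI.length) :
    (split2 (l.drop k)).tail = (split2 l).tail := by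
  induction k generalizing l with
  | zero => simp
  | succ k ih =>
    rcases l with _ | ⟨c, cs⟩
    · simp [split2] at hk ⊢
    · rw [split2_cons] at hk ⊢
      by_cases hc : c = '[' ∧ cs.head? = some '['
      · rw [if_pos hc] at hk
        simp at hk
      · rw [if_neg hc] at hk ⊢
        rcases h2 : split2 cs with _ | ⟨a, r⟩
        · exact absurd h2 (split2_ne_nil _)
        · rw [h2] at hk
          simp only [List.modifyHead, List.headI, List.length_cons] at hk
          have : k ≤ (split2 cs).headI.length := by
            rw [h2]; simpa using Nat.le_of_succ_le_succ hk
          rw [List.drop_succ_cons, ih cs this, h2]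
          simp

theorem splitOn_go_eq (fuel : Nat) : ∀ (l cur : List Char) (acc : List (List Char)),
    l.length < fuel →
    PySem.Chars.splitOn.go ['[','['] fuel l cur acc
      = acc.reverse ++ (split2 l).modifyHead (cur.reverse ++ ·) := by
  induction fuel with
  | zero => intro l cur acc h; omega
  | succ fuel ih =>
    intro l cur acc h
    rcases l with _ | ⟨c, cs⟩
    · rw [PySem.Chars.splitOn.go]
      simp [split2]
      omega
    · have hpre : (List.isPrefixOf ['[','['] (c :: cs)) = (decide (c = '[' ∧ cs.head? = some '[')) := by
        rcases cs with _ | ⟨d, cs'⟩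
        · simp [List.isPrefixOf]
        · show ('[' == c && ('[' == d && true)) = _
          simp only [List.head?_cons, Option.some.injEq]
          rw [show ('[' == c) = decide (c = '[') from by
                by_cases hx : c = '['
                · simp [hx]
                · simp [hx]; exact fun hts => hx hts.symm,
              show ('[' == d) = decide (d = '[') from by
                by_cases hx : d = '['
                · simp [hx]
                · simp [hx]; exact fun hts => hx hts.symm]
          simp
      rw [PySem.Chars.splitOn.go]
      by_cases hc : c = '[' ∧ cs.head? = some '['
      · obtain ⟨rfl, hh⟩ := hc
        rcases cs with _ | ⟨d, cs'⟩
        · simp at hh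
        · have hd : d = '[' := by simpa using hh
          subst hd
          rw [if_pos (by simp [hpre, hh])]
          have hlen : cs'.length < fuel := by simp at h; omega
          rw [show List.drop (['[','['].length) ('[' :: '[' :: cs') = cs' from rfl]
          rw [ih cs' [] (cur.reverse :: acc) hlen]
          rw [split2_cons, if_pos (by simp)]
          rcases h2 : split2 cs' with _ | ⟨a, r⟩
          · exact absurd h2 (split2_ne_nil _)
          · simp [h2]
      · rw [if_neg (by simp [hpre, hc])]
        have hlen : cs.length < fuel := by simp at h; omega
        rw [ih cs (c :: cur) acc hlen]
        rw [split2_cons, if_neg hc]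
        rcases h2 : split2 cs with _ | ⟨a, r⟩
        · exact absurd h2 (split2_ne_nil _)
        · simp [h2]

theorem splitOn_eq_split2 (l : List Char) : PySem.Chars.splitOn l ['[','['] = split2 l := by
  rw [PySem.Chars.splitOn, splitOn_go_eq (l.length + 1) l [] [] (by omega)]
  rcases h2 : split2 l with _ | ⟨a, r⟩
  · exact absurd h2 (split2_ne_nil _)
  · simp

theorem find_go_shift (sub : List Char) : ∀ (l : List Char) (k : Nat),
    PySem.Chars.find.go sub l k =
      if PySem.Chars.find.go sub l 0 = -1 then -1 else PySem.Chars.find.go sub l 0 + k := by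
  intro l
  induction l with
  | nil =>
    intro k
    by_cases he : sub.isEmpty <;> simp [PySem.Chars.find.go, he]
  | cons c cs ih =>
    intro k
    have e : ∀ m : Nat, PySem.Chars.find.go sub (c :: cs) m =
        if sub.isPrefixOf (c :: cs) = true then (m : Int)
        else PySem.Chars.find.go sub cs (m + 1) := by
      intro m; rw [PySem.Chars.find.go]
    rw [e k, e 0]
    by_cases hp : sub.isPrefixOf (c :: cs)
    · simp [hp]
    · rw [if_neg hp, if_neg hp]
      have hge : -1 ≤ PySem.Chars.find.go sub cs 0 := PySem.Chars.neg_one_le_find cs sub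
      rw [ih (k + 1), ih (0 + 1)]
      by_cases h0 : PySem.Chars.find.go sub cs 0 = -1
      · simp [h0]
      · rw [if_neg h0, if_neg h0, if_neg (by push_cast; omega)]
        push_cast
        omega

theorem find_cons (sub : List Char) (c : Char) (cs : List Char) :
    PySem.Chars.find (c :: cs) sub =
      if sub.isPrefixOf (c :: cs) then 0
      else if PySem.Chars.find cs sub = -1 then -1 else PySem.Chars.find cs sub + 1 := by
  show PySem.Chars.find.go sub (c :: cs) 0 = _
  rw [show PySem.Chars.find.go sub (c :: cs) 0 =
      if sub.isPrefixOf (c :: cs) = true then ((0 : Nat) : Int)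
      else PySem.Chars.find.go sub cs (0 + 1) from by rw [PySem.Chars.find.go]]
  by_cases hp : sub.isPrefixOf (c :: cs)
  · simp [hp]
  · rw [if_neg hp, if_neg (by simpa using hp), find_go_shift]
    rfl

theorem find_nil_eq (p : List Char) (hp : p ≠ []) : PySem.Chars.find [] p = -1 := by
  show PySem.Chars.find.go p [] 0 = -1
  rw [PySem.Chars.find.go, if_neg (by simpa using hp)]

theorem take_find (p : List Char) (hp : p ≠ []) : ∀ s : List Char,
    PySem.Chars.isIn p s = true →
    List.take (PySem.Chars.find s p).toNat s = cutPre p s := by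
  intro s
  induction s with
  | nil =>
    intro h
    rw [PySem.Chars.isIn, find_nil_eq p hp] at h
    simp at h
  | cons c cs ih =>
    intro h
    by_cases hpx : p.isPrefixOf (c :: cs)
    · rw [find_cons, if_pos hpx, cutPre, if_pos hpx]
      simp
    · have hinf : p <:+: (c :: cs) := (PySem.Chars.isIn_iff_infix p (c :: cs)).mp h
      have hcs : p <:+: cs := (List.infix_cons_iff.mp hinf).resolve_left
        (fun hpre => hpx (List.isPrefixOf_iff_prefix.mpr hpre))
      have hcsIn : PySem.Chars.isIn p cs = true := (PySem.Chars.isIn_iff_infix p cs).mpr hcs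
      have hfin : 0 ≤ PySem.Chars.find cs p := (PySem.Chars.find_nonneg_iff cs p).mpr hcs
      rw [find_cons, if_neg hpx, if_neg (by omega)]
      rw [show (PySem.Chars.find cs p + 1).toNat = (PySem.Chars.find cs p).toNat + 1 from by omega]
      rw [List.take_succ_cons, ih hcsIn, cutPre, if_neg hpx]

theorem slice_find (p s : List Char) (hp : p ≠ []) (h : PySem.Chars.isIn p s = true) :
    PySem.List.slice s none (some (PySem.Chars.find s p)) = cutPre p s := by
  have hinf : p <:+: s := (PySem.Chars.isIn_iff_infix p s).mp h
  have hf : 0 ≤ PySem.Chars.find s p := (PySem.Chars.find_nonneg_iff s p).mpr hinf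
  rw [PySem.List.slice_to s hf]
  exact take_find p hp s h

theorem pfx2_iff (c : Char) (cs : List Char) :
    [']',']'].isPrefixOf (c :: cs) = true ↔ c = ']' ∧ cs.head? = some ']' := by
  rcases cs with _ | ⟨d, cs'⟩
  · simp [List.isPrefixOf]
  · show ((']' == c) && ((']' == d) && true)) = true ↔ _
    simp only [Bool.and_true, Bool.and_eq_true, beq_iff_eq, List.head?_cons, Option.some.injEq]
    constructor
    · rintro ⟨h1, h2⟩; exact ⟨h1.symm, h2.symm⟩
    · rintro ⟨h1, h2⟩; exact ⟨h1.symm, h2.symm⟩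

theorem pfxBar_iff (c : Char) (cs : List Char) :
    ['|'].isPrefixOf (c :: cs) = true ↔ c = '|' := by
  show ((('|' == c)) && true) = true ↔ _
  simp only [Bool.and_true, beq_iff_eq]
  exact ⟨fun h => h.symm, fun h => h.symm⟩

theorem cutBar_cut2 (s : List Char) : cutPre ['|'] (cutPre [']',']'] s) = cutMin s := by
  induction s with
  | nil => rw [cutPre, cutPre, cutMin]
  | cons c cs ih =>
    rw [cutPre, cutMin]
    by_cases h2 : [']',']'].isPrefixOf (c :: cs)
    · rw [if_pos h2, if_pos (Or.inl ((pfx2_iff c cs).mp h2))]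
      rw [cutPre]
    · rw [if_neg h2]
      rw [cutPre]
      by_cases hb : ['|'].isPrefixOf (c :: cutPre [']',']'] cs)
      · have hcb : c = '|' := (pfxBar_iff _ _).mp hb
        rw [if_pos hb, if_pos (Or.inr hcb)]
      · have hcb : c ≠ '|' := fun hc => hb ((pfxBar_iff _ _).mpr hc)
        rw [if_neg hb, if_neg (by
          rintro (hL | hR)
          · exact h2 ((pfx2_iff c cs).mpr hL)
          · exact hcb hR), ih]

theorem cutPre_eq_self (p : List Char) (hp : p ≠ []) : ∀ s : List Char,
    (¬ p <:+: s) → cutPre p s = s := by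
  intro s
  induction s with
  | nil => intro _; rfl
  | cons c cs ih =>
    intro h
    rw [cutPre, if_neg (fun hpx =>
      h (List.infix_cons_iff.mpr (Or.inl (List.isPrefixOf_iff_prefix.mp hpx))))]
    rw [ih (fun hx => h (List.infix_cons_iff.mpr (Or.inr hx)))]

theorem cut2_eq_self (s : List Char) (h : PySem.Chars.isIn [']',']'] s = false) :
    cutPre [']',']'] s = s :=
  cutPre_eq_self [']',']'] (by simp) s ((PySem.Chars.isIn_eq_false_iff _ _).mp h)

theorem cutBar_eq_self (s : List Char) (h : '|' ∉ s) : cutPre ['|'] s = s :=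
  cutPre_eq_self ['|'] (by simp) s (fun hx => h ((List.singleton_infix_iff '|' s).mp hx))

theorem cutMin_eq_self (s : List Char) (h : hasT s = false) : cutMin s = s := by
  induction s with
  | nil => rw [cutMin]
  | cons c cs ih =>
    rw [hasT] at h
    simp only [Bool.or_eq_false_iff, decide_eq_false_iff_not] at h
    rw [cutMin, if_neg (by tauto), ih h.2]

theorem cutMin_length_le (s : List Char) : (cutMin s).length ≤ s.length := by
  induction s with
  | nil => simp [cutMin]
  | cons c cs ih =>
    rw [cutMin]
    by_cases h : (c = ']' ∧ cs.head? = some ']') ∨ c = '|'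
    · rw [if_pos h]; simp
    · rw [if_neg h]; simpa using ih

theorem lstrip_ws_append (w x : List Char) (hw : ∀ c ∈ w, PySem.Chars.isspace c = true) :
    PySem.Chars.lstrip (w ++ x) = PySem.Chars.lstrip x := by
  rw [PySem.Chars.lstrip, PySem.Chars.lstrip, List.dropWhile_append,
    if_pos (by simp only [List.isEmpty_iff, List.dropWhile_eq_nil_iff]; exact hw)]

theorem strip_ws_append (w x : List Char) (hw : ∀ c ∈ w, PySem.Chars.isspace c = true) :
    PySem.Chars.strip (w ++ x) = PySem.Chars.strip x := by
  rw [PySem.Chars.strip, PySem.Chars.strip, lstrip_ws_append w x hw]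

theorem strip_decomp (x : List Char) : ∃ w1 w2, x = w1 ++ PySem.Chars.strip x ++ w2 ∧
    (∀ c ∈ w1, PySem.Chars.isspace c = true) ∧ (∀ c ∈ w2, PySem.Chars.isspace c = true) := by
  refine ⟨List.takeWhile PySem.Chars.isspace x,
    (List.takeWhile PySem.Chars.isspace (PySem.Chars.lstrip x).reverse).reverse, ?_, ?_, ?_⟩
  · rw [PySem.Chars.strip, PySem.Chars.rstrip]
    conv_lhs => rw [← List.takeWhile_append_dropWhile (p := PySem.Chars.isspace) (l := x)]
    rw [List.append_assoc]
    congr 1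
    · conv_lhs => rw [show List.dropWhile PySem.Chars.isspace x = PySem.Chars.lstrip x from rfl,
        ← List.reverse_reverse (PySem.Chars.lstrip x),
        ← List.takeWhile_append_dropWhile (p := PySem.Chars.isspace)
          (l := (PySem.Chars.lstrip x).reverse)]
      rw [List.reverse_append]
  · exact fun c hc => List.mem_takeWhile_imp hc
  · intro c hc
    rw [List.mem_reverse] at hc
    exact List.mem_takeWhile_imp hc

theorem mem_strip (x : List Char) (c : Char) (hc : PySem.Chars.isspace c = false) :
    c ∈ PySem.Chars.strip x ↔ c ∈ x := by
  obtain ⟨w1, w2, hx, h1, h2⟩ := strip_decomp x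
  constructor
  · intro h
    rw [hx]
    simp [h]
  · intro h
    rw [hx] at h
    simp only [List.mem_append] at h
    rcases h with (h | h) | h
    · exact absurd (h1 c h) (by simp [hc])
    · exact h
    · exact absurd (h2 c h) (by simp [hc])

theorem cutBar_append_of_mem (a b : List Char) (h : '|' ∈ a) :
    cutPre ['|'] (a ++ b) = cutPre ['|'] a := by
  induction a with
  | nil => simp at h
  | cons c cs ih =>
    rw [List.cons_append, cutPre, cutPre]
    by_cases hcb : c = '|'
    · rw [if_pos ((pfxBar_iff _ _).mpr hcb), if_pos ((pfxBar_iff _ _).mpr hcb)]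
    · have h' : '|' ∈ cs := by
        rcases List.mem_cons.mp h with h | h
        · exact absurd h.symm hcb
        · exact h
      rw [if_neg (fun hx => hcb ((pfxBar_iff _ _).mp hx)),
        if_neg (fun hx => hcb ((pfxBar_iff _ _).mp hx)), ih h']

theorem cutBar_append_of_not_mem (a b : List Char) (h : '|' ∉ a) :
    cutPre ['|'] (a ++ b) = a ++ cutPre ['|'] b := by
  induction a with
  | nil => simp
  | cons c cs ih =>
    have hcb : c ≠ '|' := fun hx => h (by simp [hx])
    rw [List.cons_append, cutPre, if_neg (fun hx => hcb ((pfxBar_iff _ _).mp hx)),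
      ih (fun hx => h (by simp [hx])), List.cons_append]

theorem strip_cutBar_strip (x : List Char) (h : '|' ∈ PySem.Chars.strip x) :
    PySem.Chars.strip (cutPre ['|'] (PySem.Chars.strip x)) = PySem.Chars.strip (cutPre ['|'] x) := by
  obtain ⟨w1, w2, hx, h1, h2⟩ := strip_decomp x
  have hw1 : '|' ∉ w1 := fun hm => by have := h1 '|' hm; simp [PySem.Chars.isspace] at this
  conv_rhs => rw [hx, List.append_assoc,
    cutBar_append_of_not_mem w1 _ hw1,
    cutBar_append_of_mem _ w2 h,
    strip_ws_append w1 _ h1]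

theorem isIn_bar_iff_mem (x : List Char) : PySem.Chars.isIn ['|'] x = true ↔ '|' ∈ x := by
  rw [PySem.Chars.isIn_iff_infix]
  exact List.singleton_infix_iff '|' x

theorem hasT_iff (s : List Char) :
    hasT s = true ↔ ([']',']'] <:+: s ∨ '|' ∈ s) := by
  induction s with
  | nil => simp [hasT]
  | cons c cs ih =>
    rw [hasT]
    simp only [Bool.or_eq_true, decide_eq_true_eq, ih]
    rw [List.infix_cons_iff, List.mem_cons]
    constructor
    · rintro ((h | h) | (h | h))
      · exact Or.inl (Or.inl (List.isPrefixOf_iff_prefix.mp ((pfx2_iff c cs).mpr h)))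
      · exact Or.inr (Or.inl h.symm)
      · exact Or.inl (Or.inr h)
      · exact Or.inr (Or.inr h)
    · rintro ((h | h) | (h | h))
      · exact Or.inl (Or.inl ((pfx2_iff c cs).mp (List.isPrefixOf_iff_prefix.mpr h)))
      · exact Or.inr (Or.inl h)
      · exact Or.inl (Or.inr h.symm)
      · exact Or.inr (Or.inr h)

-- A's per-line pipeline collapses to: cut at the first ']]'-or-'|' (if any) and strip
theorem aLine_char (s : List Char) :
    aLine s = if isPic s then
      (if hasT s then
        (if extM (PySem.Chars.strip (cutMin s)) then 1 else 0)
       else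
        (if extM s then 1 else 0))
    else 0 := by
  simp only [aLine, isPic, extM]
  by_cases hP : (PySem.Chars.startswith s ['f','i','l','e',':']
      || PySem.Chars.startswith s ['i','m','a','g','e',':']) = true
  · rw [if_pos hP, if_pos hP]
    by_cases hz : PySem.Chars.isIn [']',']'] s = true
    · rw [if_pos hz, slice_find [']',']'] s (by simp) hz]
      by_cases hb : PySem.Chars.isIn ['|'] (PySem.Chars.strip (cutPre [']',']'] s)) = true
      · rw [if_pos hb, slice_find ['|'] _ (by simp) hb]
        have hmem : '|' ∈ PySem.Chars.strip (cutPre [']',']'] s) := (isIn_bar_iff_mem _).mp hb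
        rw [strip_cutBar_strip _ hmem, cutBar_cut2]
        have ht : hasT s = true := (hasT_iff s).mpr (Or.inl ((PySem.Chars.isIn_iff_infix _ _).mp hz))
        rw [ht]
        simp
      · rw [if_neg hb]
        have hnm : '|' ∉ cutPre [']',']'] s := fun hm => hb ((isIn_bar_iff_mem _).mpr
          ((mem_strip _ '|' (by decide)).mpr hm))
        have hcm : cutMin s = cutPre [']',']'] s := by
          rw [← cutBar_cut2, cutBar_eq_self _ hnm]
        have ht : hasT s = true := (hasT_iff s).mpr (Or.inl ((PySem.Chars.isIn_iff_infix _ _).mp hz))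
        rw [ht, hcm]
        simp
    · rw [if_neg hz]
      have hc2 : cutPre [']',']'] s = s := cut2_eq_self s (by simpa using hz)
      by_cases hb : PySem.Chars.isIn ['|'] s = true
      · rw [if_pos hb, slice_find ['|'] s (by simp) hb]
        rw [show cutPre ['|'] s = cutMin s from by rw [← cutBar_cut2, hc2]]
        have ht : hasT s = true := (hasT_iff s).mpr (Or.inr ((isIn_bar_iff_mem s).mp hb))
        rw [ht]
        simp
      · rw [if_neg hb]
        have ht : hasT s = false := by
          rw [Bool.eq_false_iff]
          intro hx
          rcases (hasT_iff s).mp hx with h | h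
          · exact hz ((PySem.Chars.isIn_iff_infix [']',']'] s).mpr h)
          · exact hb ((isIn_bar_iff_mem s).mpr h)
        rw [ht]
        simp only [Bool.false_eq_true, if_false]
        rfl
  · rw [if_neg hP, if_neg hP]

-- the scanner computes exactly the cut name of the first '[['-segment
theorem altScanName_eq (l : List Char) :
    altScanName l = cutMin (split2 l).headI := by
  induction l with
  | nil =>
    rw [altScanName]
    rw [show split2 [] = [[]] from rfl]
    simp only [List.headI]
    rw [cutMin]
  | cons c cs ih =>
    rw [altScanName]
    by_cases h1 : c = ']' ∧ cs.head? = some ']'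
    · rw [if_pos h1]
      have hnot : ¬ (c = '[' ∧ cs.head? = some '[') := by
        rintro ⟨rfl, _⟩; exact absurd h1.1 (by decide)
      rw [split2_cons, if_neg hnot]
      rcases h2 : split2 cs with _ | ⟨a, r⟩
      · exact absurd h2 (split2_ne_nil _)
      · have ha : a.head? = some ']' := by
          have := (head?_headI_split2 cs ']' (by decide)).mpr h1.2
          rw [h2] at this; simpa using this
        simp only [List.modifyHead, List.headI]
        rw [cutMin, if_pos (Or.inl ⟨h1.1, ha⟩)]
    · rw [if_neg h1]
      by_cases hb : c = '|'
      · rw [if_pos hb]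
        have hnot : ¬ (c = '[' ∧ cs.head? = some '[') := by
          rintro ⟨rfl, _⟩; exact absurd hb (by decide)
        rw [split2_cons, if_neg hnot]
        rcases h2 : split2 cs with _ | ⟨a, r⟩
        · exact absurd h2 (split2_ne_nil _)
        · simp only [List.modifyHead, List.headI]
          rw [cutMin, if_pos (Or.inr hb)]
      · rw [if_neg hb]
        by_cases hs : c = '[' ∧ cs.head? = some '['
        · rw [if_pos hs, split2_cons, if_pos hs]
          simp only [List.headI]
          rw [cutMin]
        · rw [if_neg hs, split2_cons, if_neg hs]
          rcases h2 : split2 cs with _ | ⟨a, r⟩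
          · exact absurd h2 (split2_ne_nil _)
          · rw [h2] at ih
            simp only [List.modifyHead, List.headI] at ih ⊢
            have hhead : ¬ (c = ']' ∧ a.head? = some ']') := by
              rintro ⟨rfl, hh⟩
              exact h1 ⟨rfl, (head?_headI_split2 cs ']' (by decide)).mp (by rw [h2]; simpa using hh)⟩
            rw [cutMin, if_neg (by tauto), ih]

theorem aLine_notP (line : List Char)
    (h : (PySem.Chars.startswith line ['f','i','l','e',':']
       || PySem.Chars.startswith line ['i','m','a','g','e',':']) = false) : aLine line = 0 := by
  rw [aLine, if_neg (by simp [h])]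

theorem bLine_notP (line : List Char) (h : isPic line = false) : bLine line = 0 := by
  rw [bLine, if_neg (by simp [h])]

theorem file_no_bracket : ∀ x ∈ ['f','i','l','e',':'], x ≠ '[' := by simp

theorem image_no_bracket : ∀ x ∈ ['i','m','a','g','e',':'], x ≠ '[' := by simp

theorem altLoop_eq_nil : altLoop true [] = segSumB [] ∧ altLoop false [] = tailSumB [] := by
  have h0 : bLine [] = 0 := bLine_notP [] (by decide)
  constructor
  · rw [altLoop, segSumB]
    rw [show split2 [] = [[]] from rfl]
    simp [h0]
  · rw [altLoop, tailSumB]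
    rw [show split2 [] = [[]] from rfl]
    simp

theorem altLoop_eq (N : Nat) : ∀ l : List Char, l.length ≤ N →
    altLoop true l = segSumB l ∧ altLoop false l = tailSumB l := by
  induction N with
  | zero =>
    intro l hl
    have hnil : l = [] := List.eq_nil_of_length_eq_zero (Nat.le_zero.mp hl)
    subst hnil
    exact altLoop_eq_nil
  | succ N ih =>
    intro l hl
    rcases l with _ | ⟨c, cs⟩
    · exact altLoop_eq_nil
    constructor
    · -- altLoop true (c :: cs) = segSumB (c :: cs)
      rw [altLoop]
      by_cases hP : (PySem.Chars.startswith (c :: cs) ['f','i','l','e',':']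
          || PySem.Chars.startswith (c :: cs) ['i','m','a','g','e',':']) = true
      · rw [dif_pos (by simp [hP])]
        have hscan := altScanName_eq (c :: cs)
        rcases hsp : split2 (c :: cs) with _ | ⟨a, r⟩
        · exact absurd hsp (split2_ne_nil _)
        rw [hsp] at hscan
        simp only [List.headI] at hscan
        have hpos : 1 ≤ (cutMin a).length := by
          have := altScanName_pos (c :: cs) hP
          rw [hscan] at this
          exact this
        have hle : (cutMin a).length ≤ a.length := cutMin_length_le a
        have hIH := (ih ((c :: cs).drop (cutMin a).length) (by
          simp only [List.length_drop, List.length_cons]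
          simp only [List.length_cons] at hl
          omega)).2
        have htail : (split2 ((c :: cs).drop (cutMin a).length)).tail = (split2 (c :: cs)).tail :=
          tail_split2_drop _ _ (by rw [hsp]; simpa using hle)
        have hPa : isPic a = true := by
          rcases Bool.or_eq_true_iff.mp hP with h | h
          · refine Bool.or_eq_true_iff.mpr (Or.inl ?_)
            have hpre := prefix_headI_split2 ['f','i','l','e',':'] (c :: cs) file_no_bracket
              (List.isPrefixOf_iff_prefix.mp h)
            rw [hsp] at hpre
            simp only [List.headI] at hpre
            exact List.isPrefixOf_iff_prefix.mpr hpre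
          · refine Bool.or_eq_true_iff.mpr (Or.inr ?_)
            have hpre := prefix_headI_split2 ['i','m','a','g','e',':'] (c :: cs) image_no_bracket
              (List.isPrefixOf_iff_prefix.mp h)
            rw [hsp] at hpre
            simp only [List.headI] at hpre
            exact List.isPrefixOf_iff_prefix.mpr hpre
        simp only [hscan, hIH]
        rw [tailSumB, htail, hsp, List.tail_cons, segSumB, hsp]
        rw [List.map_cons, List.sum_cons]
        rw [bLine, if_pos hPa]
        simp only [extM]
        rfl
      · rw [dif_neg (by simp [hP])]
        by_cases hbr : c = '[' ∧ cs.head? = some '['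
        · rw [if_pos hbr]
          obtain ⟨rfl, hh⟩ := hbr
          rcases cs with _ | ⟨d, cs'⟩
          · simp at hh
          have hd : d = '[' := by simpa using hh
          subst hd
          have hIH := (ih cs' (by simp at hl ⊢; omega)).1
          have hsplit : split2 ('[' :: '[' :: cs') = [] :: split2 cs' := by
            rw [split2_cons, if_pos ⟨rfl, rfl⟩, List.tail_cons]
          rw [show (('[' :: '[' :: cs').drop 2) = cs' from rfl, hIH, segSumB, segSumB, hsplit]
          simp only [List.map_cons, List.sum_cons]
          rw [bLine_notP [] (by decide)]
          omega
        · rw [if_neg hbr]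
          have hIH := (ih cs (by simp at hl ⊢; omega)).2
          rw [hIH, segSumB, split2_cons, if_neg hbr]
          rcases h2 : split2 cs with _ | ⟨a, r⟩
          · exact absurd h2 (split2_ne_nil _)
          simp only [List.modifyHead, List.map_cons, List.sum_cons]
          have hnp : bLine (c :: a) = 0 := by
            apply bLine_notP
            rw [Bool.eq_false_iff]
            intro htr
            apply hP
            have hpfx : (c :: a) <+: (c :: cs) := by
              have := headI_split2_prefix (c :: cs)
              rw [split2_cons, if_neg hbr, h2] at this
              simpa using this
            rcases Bool.or_eq_true_iff.mp htr with h | h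
            · exact Bool.or_eq_true_iff.mpr (Or.inl (List.isPrefixOf_iff_prefix.mpr
                ((List.isPrefixOf_iff_prefix.mp h).trans hpfx)))
            · exact Bool.or_eq_true_iff.mpr (Or.inr (List.isPrefixOf_iff_prefix.mpr
                ((List.isPrefixOf_iff_prefix.mp h).trans hpfx)))
          rw [hnp, tailSumB, h2, List.tail_cons]
          omega
    · -- altLoop false (c :: cs) = tailSumB (c :: cs)
      rw [altLoop]
      rw [dif_neg (by simp)]
      by_cases hbr : c = '[' ∧ cs.head? = some '['
      · rw [if_pos hbr]
        obtain ⟨rfl, hh⟩ := hbr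
        rcases cs with _ | ⟨d, cs'⟩
        · simp at hh
        have hd : d = '[' := by simpa using hh
        subst hd
        have hIH := (ih cs' (by simp at hl ⊢; omega)).1
        have hsplit : split2 ('[' :: '[' :: cs') = [] :: split2 cs' := by
          rw [split2_cons, if_pos ⟨rfl, rfl⟩, List.tail_cons]
        rw [show (('[' :: '[' :: cs').drop 2) = cs' from rfl, hIH, tailSumB, hsplit,
          List.tail_cons, segSumB]
      · rw [if_neg hbr]
        have hIH := (ih cs (by simp at hl ⊢; omega)).2
        have hsplit : split2 (c :: cs) = (split2 cs).modifyHead (c :: ·) := by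
          rw [split2_cons, if_neg hbr]
        rw [hIH, tailSumB, tailSumB, hsplit]
        rcases h2 : split2 cs with _ | ⟨a, r⟩
        · exact absurd h2 (split2_ne_nil _)
        simp only [List.modifyHead, List.tail_cons]

theorem foldA_eq_segSum (l : List Char) :
    (split2 l).foldl
      (fun imageCount line =>
        if PySem.Chars.startswith line ['f','i','l','e',':']
            || PySem.Chars.startswith line ['i','m','a','g','e',':'] then
          let line1 := if PySem.Chars.isIn [']',']'] line then
              PySem.Chars.strip (PySem.List.slice line none (some (PySem.Chars.find line [']',']'])))
            else line
          let line2 := if PySem.Chars.isIn ['|'] line1 then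
              PySem.Chars.strip (PySem.List.slice line1 none (some (PySem.Chars.find line1 ['|'])))
            else line1
          if PySem.Chars.endswith line2 ['.','g','i','f']
              || PySem.Chars.endswith line2 ['.','j','p','g']
              || PySem.Chars.endswith line2 ['.','p','n','g'] then
            imageCount + 1
          else imageCount
        else imageCount) 0 = segSum l := by
  refine (PySem.List.foldl_congr_mem (split2 l) _ (fun acc line => acc + aLine line) 0 ?_).trans ?_
  · intro acc x _
    simp only [aLine]
    split_ifs <;> omega
  · rw [PySem.List.foldl_add, zero_add, segSum]

-- strip is the identity on a list whose first and last characters are not whitespace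
theorem strip_eq_self_of (s : List Char) (c d : Char)
    (hh : s.head? = some c) (hc : PySem.Chars.isspace c = false)
    (hl : s.getLast? = some d) (hd : PySem.Chars.isspace d = false) :
    PySem.Chars.strip s = s := by
  rcases s with _ | ⟨x, t⟩
  · simp at hh
  have hx : x = c := by simpa using hh
  have hc' : PySem.Chars.isspace x = false := hx ▸ hc
  have hlstrip : PySem.Chars.lstrip (x :: t) = x :: t := by
    rw [PySem.Chars.lstrip, List.dropWhile_cons, if_neg (by simp [hc'])]
  rw [PySem.Chars.strip, hlstrip, PySem.Chars.rstrip]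
  rcases hr : (x :: t).reverse with _ | ⟨y, r⟩
  · simp at hr
  have hy : y = d := by
    have h2 : (x :: t).reverse.head? = some d := by
      rw [List.head?_reverse]; exact hl
    rw [hr] at h2; simpa using h2
  have hd' : PySem.Chars.isspace y = false := hy ▸ hd
  rw [List.dropWhile_cons, if_neg (by simp [hd']), ← hr, List.reverse_reverse]

-- a nonempty suffix determines the last element
theorem getLast?_of_suffix (p s : List Char) (hp : p ≠ []) (h : p <:+ s) :
    s.getLast? = p.getLast? := by
  obtain ⟨t, ht⟩ := h
  subst ht
  exact List.getLast?_append_of_ne_nil _ hp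

-- a file:/image: segment starts with a non-whitespace character
theorem isPic_head (s : List Char) (hpic : isPic s = true) :
    ∃ c, s.head? = some c ∧ PySem.Chars.isspace c = false := by
  rcases Bool.or_eq_true_iff.mp hpic with h | h
  · obtain ⟨t, ht⟩ := (PySem.Chars.startswith_iff _ _).mp h
    subst ht
    exact ⟨'f', by simp, by decide⟩
  · obtain ⟨t, ht⟩ := (PySem.Chars.startswith_iff _ _).mp h
    subst ht
    exact ⟨'i', by simp, by decide⟩

-- a segment matching an image extension ends with a non-whitespace character
theorem extM_last (s : List Char) (hm : extM s = true) :
    ∃ d, s.getLast? = some d ∧ PySem.Chars.isspace d = false := by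
  rcases Bool.or_eq_true_iff.mp hm with h | h
  · rcases Bool.or_eq_true_iff.mp h with h | h
    · exact ⟨'f', by
        rw [getLast?_of_suffix ['.','g','i','f'] s (by simp)
          ((PySem.Chars.endswith_iff _ _).mp h)]; rfl, by decide⟩
    · exact ⟨'g', by
        rw [getLast?_of_suffix ['.','j','p','g'] s (by simp)
          ((PySem.Chars.endswith_iff _ _).mp h)]; rfl, by decide⟩
  · exact ⟨'g', by
      rw [getLast?_of_suffix ['.','p','n','g'] s (by simp)
        ((PySem.Chars.endswith_iff _ _).mp h)]; rfl, by decide⟩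

-- if the segment starts with file:/image: and already matches an image extension,
-- stripping changes nothing
theorem strip_id_of_match (s : List Char) (hpic : isPic s = true) (hm : extM s = true) :
    PySem.Chars.strip s = s := by
  obtain ⟨c, hh, hc⟩ := isPic_head s hpic
  obtain ⟨d, hl, hd⟩ := extM_last s hm
  exact strip_eq_self_of s c d hh hc hl hd

-- the change condition in D_ restated in the vocabulary of the proofs
theorem badSeg_iff (seg : List Char) :
    ((['f','i','l','e',':'] <+: seg ∨ ['i','m','a','g','e',':'] <+: seg) ∧
     ¬ [']',']'] <:+: seg ∧ '|' ∉ seg ∧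
     (seg.getLast?.any PySem.Chars.isspace) = true ∧
     (['.','g','i','f'] <:+ PySem.Chars.strip seg ∨ ['.','j','p','g'] <:+ PySem.Chars.strip seg ∨
       ['.','p','n','g'] <:+ PySem.Chars.strip seg))
    ↔ (isPic seg = true ∧ hasT seg = false ∧ extM seg = false ∧
        extM (PySem.Chars.strip seg) = true) := by
  constructor
  · rintro ⟨hpre, hni, hnb, hlast, hsuf⟩
    have hpic : isPic seg = true := by
      rcases hpre with h | h
      · exact Bool.or_eq_true_iff.mpr (Or.inl ((PySem.Chars.startswith_iff _ _).mpr h))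
      · exact Bool.or_eq_true_iff.mpr (Or.inr ((PySem.Chars.startswith_iff _ _).mpr h))
    refine ⟨hpic, ?_, ?_, ?_⟩
    · rw [Bool.eq_false_iff]
      intro h
      rcases (hasT_iff seg).mp h with h | h
      · exact hni h
      · exact hnb h
    · rw [Bool.eq_false_iff]
      intro h
      obtain ⟨d, hl, hd⟩ := extM_last seg h
      rw [hl] at hlast
      simp only [Option.any_some] at hlast
      rw [hlast] at hd
      exact absurd hd (by simp)
    · rcases hsuf with h | h
      · exact Bool.or_eq_true_iff.mpr (Or.inl (Bool.or_eq_true_iff.mpr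
          (Or.inl ((PySem.Chars.endswith_iff _ _).mpr h))))
      · rcases h with h | h
        · exact Bool.or_eq_true_iff.mpr (Or.inl (Bool.or_eq_true_iff.mpr
            (Or.inr ((PySem.Chars.endswith_iff _ _).mpr h))))
        · exact Bool.or_eq_true_iff.mpr (Or.inr ((PySem.Chars.endswith_iff _ _).mpr h))
  · rintro ⟨hpic, ht, hm, hms⟩
    refine ⟨?_, ?_, ?_, ?_, ?_⟩
    · rcases Bool.or_eq_true_iff.mp hpic with h | h
      · exact Or.inl ((PySem.Chars.startswith_iff _ _).mp h)
      · exact Or.inr ((PySem.Chars.startswith_iff _ _).mp h)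
    · intro h
      exact absurd ((hasT_iff seg).mpr (Or.inl h)) (by simp [ht])
    · intro h
      exact absurd ((hasT_iff seg).mpr (Or.inr h)) (by simp [ht])
    · obtain ⟨c, hh, hc⟩ := isPic_head seg hpic
      rcases seg with _ | ⟨x, t⟩
      · simp at hh
      obtain ⟨d, hl⟩ : ∃ d, (x :: t).getLast? = some d :=
        ⟨(x :: t).getLast (by simp), List.getLast?_eq_some_getLast (by simp)⟩
      rw [hl]
      simp only [Option.any_some]
      by_contra hds
      have hd : PySem.Chars.isspace d = false := Bool.eq_false_iff.mpr hds
      rw [strip_eq_self_of (x :: t) c d hh hc hl hd] at hms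
      exact absurd hms (by simp [hm])
    · rcases Bool.or_eq_true_iff.mp hms with h | h
      · rcases Bool.or_eq_true_iff.mp h with h | h
        · exact Or.inl ((PySem.Chars.endswith_iff _ _).mp h)
        · exact Or.inr (Or.inl ((PySem.Chars.endswith_iff _ _).mp h))
      · exact Or.inr (Or.inr ((PySem.Chars.endswith_iff _ _).mp h))

theorem aLine_le_bLine (s : List Char) : aLine s ≤ bLine s := by
  rw [aLine_char, bLine]
  by_cases hpic : isPic s = true
  · rw [if_pos hpic, if_pos hpic]
    by_cases ht : hasT s = true
    · rw [if_pos ht]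
    · have ht' : hasT s = false := Bool.eq_false_iff.mpr ht
      rw [ht', cutMin_eq_self s ht']
      simp only [Bool.false_eq_true, if_false]
      by_cases hm : extM s = true
      · rw [if_pos hm, strip_id_of_match s hpic hm, if_pos hm]
      · rw [if_neg hm]
        split_ifs <;> omega
  · rw [if_neg hpic, if_neg hpic]

theorem aLine_eq_bLine_of_good (s : List Char)
    (hg : ¬ (isPic s = true ∧ hasT s = false ∧ extM s = false ∧
      extM (PySem.Chars.strip s) = true)) : aLine s = bLine s := by
  rw [aLine_char, bLine]
  by_cases hpic : isPic s = true
  · rw [if_pos hpic, if_pos hpic]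
    by_cases ht : hasT s = true
    · rw [if_pos ht]
    · have ht' : hasT s = false := Bool.eq_false_iff.mpr ht
      rw [ht', cutMin_eq_self s ht']
      simp only [Bool.false_eq_true, if_false]
      by_cases hm : extM s = true
      · rw [if_pos hm, strip_id_of_match s hpic hm, if_pos hm]
      · have hmf : extM s = false := Bool.eq_false_iff.mpr hm
        have hms : extM (PySem.Chars.strip s) = false := by
          rw [Bool.eq_false_iff]
          intro h
          exact hg ⟨hpic, ht', hmf, h⟩
        rw [if_neg hm, hms]
        simp
  · rw [if_neg hpic, if_neg hpic]

theorem aLine_lt_bLine_of_bad (s : List Char)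
    (hb : isPic s = true ∧ hasT s = false ∧ extM s = false ∧
      extM (PySem.Chars.strip s) = true) : aLine s < bLine s := by
  obtain ⟨hpic, ht, hm, hms⟩ := hb
  rw [aLine_char, bLine, if_pos hpic, if_pos hpic, ht, cutMin_eq_self s ht]
  simp only [Bool.false_eq_true, if_false]
  rw [if_neg (by simp [hm]), if_pos hms]
  omega

theorem getImageCount_eq_segSum (linkText : String) :
    getImageCount linkText = segSum (PySem.Chars.lower linkText.toList) := by
  unfold getImageCount
  by_cases h : linkText = ""
  · subst h
    rw [if_pos rfl]
    have h0 : PySem.Chars.lower (String.toList "") = [] := by simp [PySem.Chars.lower]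
    rw [h0, segSum]
    simp [split2, aLine_notP [] (by decide)]
  · rw [if_neg h, splitOn_eq_split2, foldA_eq_segSum]

theorem getImageCount_alt_eq_segSumB (linkText : String) :
    getImageCount_alt linkText = segSumB (PySem.Chars.lower linkText.toList) := by
  unfold getImageCount_alt
  exact (altLoop_eq (PySem.Chars.lower linkText.toList).length _ le_rfl).1

-- ===== VERDICT (by name: the statements are the Claim_ definitions above) =====
theorem getImageCount_spec : Claim_unchanged_getImageCount := by
  intro linkText _ hD
  rw [getImageCount_eq_segSum, getImageCount_alt_eq_segSumB, segSum, segSumB]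
  apply congrArg
  apply List.map_congr_left
  intro x hx
  refine aLine_eq_bLine_of_good x ?_
  intro hbad
  refine hD ⟨x, ?_, (badSeg_iff x).mpr hbad⟩
  rw [show ("[[".toList) = ['[','['] from rfl, splitOn_eq_split2]
  exact hx

theorem getImageCount_changed : Claim_changed_getImageCount := by
  unfold Claim_changed_getImageCount
  refine ⟨by decide, by decide, ?_, ?_, by decide⟩
  · rw [getImageCount_eq_segSum]
    decide
  · rw [getImageCount_alt_eq_segSumB]
    decide

theorem getImageCount_tight : Claim_exact_getImageCount := by
  intro linkText _ hD
  rw [getImageCount_eq_segSum, getImageCount_alt_eq_segSumB, segSum, segSumB]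
  obtain ⟨x, hx, hbad⟩ := hD
  rw [show ("[[".toList) = ['[','['] from rfl, splitOn_eq_split2] at hx
  exact ne_of_lt (List.sum_lt_sum aLine bLine
    (fun i _ => aLine_le_bLine i) ⟨x, hx, aLine_lt_bLine_of_bad x ((badSeg_iff x).mp hbad)⟩)
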